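-- pv_equiv track=rewrite | github.com/DeleySelem/kvbrwpns | MiBrute/mibrute34.py | generate_next_phrase
-- ===== SOURCE A (Python) =====
-- def get_next_char(current_char, unique_chars):
--     """Get the next character from unique characters list."""
--     if current_char in unique_chars:
--         current_index = unique_chars.index(current_char)
--         return unique_chars[(current_index + 1) % len(unique_chars)]
--     return current_char  # Fallback
--
-- def get_next_digit(current_digit, unique_digits):
--     """Get the next digit from unique digits list."""
--     if current_digit in unique_digits:
--         current_index = unique_digits.index(current_digit)
--         return unique_digits[(current_index + 1) % len(unique_digits)]
--     return current_digit  # Fallback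
--
-- def generate_next_phrase(phrases):
--     """Generate the next phrase based on existing phrases."""
--     base_phrase = phrases[0]  # Start with the first phrase
--     next_phrase = []
--
--     for i in range(len(base_phrase)):
--         chars_at_index = [p[i] for p in phrases if len(p) > i]  # Get all chars at this index
--         unique_chars = sorted(set(char for char in chars_at_index if char.isalpha()))
--         unique_digits = sorted(set(char for char in chars_at_index if char.isdigit()))
--
--         if base_phrase[i].isalpha():
--             next_char = get_next_char(base_phrase[i], unique_chars)
--             next_phrase.append(next_char)
--         elif base_phrase[i].isdigit():
--             next_digit = get_next_digit(base_phrase[i], unique_digits)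
--             next_phrase.append(next_digit)
--         else:
--             next_phrase.append(base_phrase[i])  # Keep other characters unchanged
--
--     return ''.join(next_phrase)
-- ===== SOURCE B (Python) =====
-- def generate_next_phrase(phrases):
--     """Generate the next phrase based on existing phrases."""
--     base = phrases[0]
--     n = len(base)
--     # One pass over all phrases: per-position table of the characters seen there.
--     cols = [set() for _ in range(n)]
--     for p in phrases:
--         for i, ch in enumerate(p[:n]):
--             cols[i].add(ch)
--     out = []
--     for i, c in enumerate(base):
--         if c.isalpha():
--             pool = [x for x in cols[i] if x.isalpha()]
--         elif c.isdigit():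
--             pool = [x for x in cols[i] if x.isdigit()]
--         else:
--             out.append(c)
--             continue
--         bigger = [x for x in pool if x > c]
--         # cyclic successor = least element above c, wrapping to the overall least
--         out.append(min(bigger) if bigger else min(pool))
--     return ''.join(out)
-- ===== Notes on version B (the rewrite author's own statement) =====
-- stated objective: alternative
-- what changed: B builds a per-position character-set table in one pass over all phrases instead of re-scanning every phrase at each position, and replaces A's sort+index cyclic advance with a direct min-based successor (least element above the char, wrapping to the overall minimum).
import Mathlib
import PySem

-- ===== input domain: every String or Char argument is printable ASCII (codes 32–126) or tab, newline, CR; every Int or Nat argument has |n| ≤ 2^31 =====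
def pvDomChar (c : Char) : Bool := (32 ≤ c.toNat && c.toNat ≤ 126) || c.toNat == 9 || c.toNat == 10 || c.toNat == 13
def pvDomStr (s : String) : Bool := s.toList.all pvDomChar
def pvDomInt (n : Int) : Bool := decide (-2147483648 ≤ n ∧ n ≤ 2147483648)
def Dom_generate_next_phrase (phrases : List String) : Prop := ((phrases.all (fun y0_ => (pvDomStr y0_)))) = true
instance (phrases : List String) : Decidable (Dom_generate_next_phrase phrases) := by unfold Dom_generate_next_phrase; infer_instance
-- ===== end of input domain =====

-- B replaces A's per-position re-scan of all phrases by a one-pass per-position set table,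
-- and A's sort+index cyclic advance by a min-based successor; equal on every non-empty phrase list.


-- ===== PORT A =====
-- get_next_char: cyclic advance in the sorted unique list via .index and modular lookup
def pvGetNextChar (c : Char) (l : List Char) : Char :=
  if c ∈ l then
    match PySem.List.index? l c with
    | some k => PySem.List.pyGetD l (((k + 1) % l.length : Nat) : Int) c
    | none => c
  else c

-- get_next_digit (textually identical helper in A)
def pvGetNextDigit (c : Char) (l : List Char) : Char :=
  if c ∈ l then
    match PySem.List.index? l c with
    | some k => PySem.List.pyGetD l (((k + 1) % l.length : Nat) : Int) c
    | none => c
  else c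

-- body of A on char lists: for i in range(len(base)) gather column, sorted(set(...)), advance
def pvGenA (phrases : List (List Char)) (base : List Char) : List Char :=
  (PySem.List.pyRange 0 (base.length : Int) 1).foldl (fun acc i =>
    let col := (phrases.filter (fun p => decide (i < (p.length : Int)))).map
                 (fun p => PySem.List.pyGetD p i ' ')   -- in range: the filter guarantees i < len p
    let uc := PySem.List.sorted (PySem.Set.ofList (col.filter (fun ch => PySem.Chars.isalpha ch))) (fun x => x) false
    let ud := PySem.List.sorted (PySem.Set.ofList (col.filter (fun ch => PySem.Chars.isdigit ch))) (fun x => x) false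
    let c := PySem.List.pyGetD base i ' '               -- in range: i < len base
    if PySem.Chars.isalpha c then acc ++ [pvGetNextChar c uc]
    else if PySem.Chars.isdigit c then acc ++ [pvGetNextDigit c ud]
    else acc ++ [c]) []

def generate_next_phrase (phrases : List String) : String :=
  -- phrases[0]: IndexError on []; Pre_ excludes it, pyGetD used under that guarantee
  String.ofList (pvGenA (phrases.map String.toList) (PySem.List.pyGetD phrases 0 "").toList)

-- ===== PORT B =====
-- one pass over all phrases building the per-position set table cols
def pvCols (phrases : List (List Char)) (n : Nat) : List (PySem.Set Char) :=
  phrases.foldl (fun cols p =>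
    (PySem.List.enumerate (p.take n) 0).foldl       -- p[:n] = take n (n ≥ 0)
      (fun cols ic => PySem.List.pySetD cols ic.1 (PySem.Set.add (PySem.List.pyGetD cols ic.1 []) ic.2))
      cols)
    (List.replicate n ([] : PySem.Set Char))

-- body of B: for i, c in enumerate(base), min-based successor from the table
def pvGenB (phrases : List (List Char)) (base : List Char) : List Char :=
  let cols := pvCols phrases base.length
  (PySem.List.enumerate base 0).foldl (fun out ic =>
    let c := ic.2
    if PySem.Chars.isalpha c then
      let pool := (PySem.List.pyGetD cols ic.1 []).filter (fun x => PySem.Chars.isalpha x)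
      let bigger := pool.filter (fun x => decide (c < x))
      out ++ [match PySem.List.min? bigger (fun x => x) with
              | some m => m
              | none => (PySem.List.min? pool (fun x => x)).getD c]  -- pool ∋ c, so min(pool) never raises
    else if PySem.Chars.isdigit c then
      let pool := (PySem.List.pyGetD cols ic.1 []).filter (fun x => PySem.Chars.isdigit x)
      let bigger := pool.filter (fun x => decide (c < x))
      out ++ [match PySem.List.min? bigger (fun x => x) with
              | some m => m
              | none => (PySem.List.min? pool (fun x => x)).getD c]
    else out ++ [c]) []

def generate_next_phrase_alt (phrases : List String) : String :=
  String.ofList (pvGenB (phrases.map String.toList) (PySem.List.pyGetD phrases 0 "").toList)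

-- ===== PRECONDITION & SPEC =====
-- A evaluates phrases[0]: on the empty list it raises IndexError, hence excluded.
def Pre_generate_next_phrase (phrases : List String) : Prop := phrases ≠ []
instance (phrases : List String) : Decidable (Pre_generate_next_phrase phrases) := by
  unfold Pre_generate_next_phrase; infer_instance

def pvWitness_generate_next_phrase : List String := ["ab1!", "cz9!", "b"]

def Spec_generate_next_phrase (phrases : List String) (out : String) : Prop := out = generate_next_phrase_alt phrases
instance (phrases : List String) (out : String) : Decidable (Spec_generate_next_phrase phrases out) := by unfold Spec_generate_next_phrase; infer_instance

-- ===== CLAIM (what is proved, stated in full; the proofs are below) =====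
def Claim_equal_generate_next_phrase : Prop := ∀ (phrases : List String), Dom_generate_next_phrase phrases → Pre_generate_next_phrase phrases → Spec_generate_next_phrase phrases (generate_next_phrase phrases)

-- ===== LEMMAS AND PROOFS =====


theorem inner_len (ys : List Char) (s : Nat) (cols : List (PySem.Set Char)) :
    ((PySem.List.enumerate ys (s : Int)).foldl
      (fun cols ic => PySem.List.pySetD cols ic.1 (PySem.Set.add (PySem.List.pyGetD cols ic.1 []) ic.2))
      cols).length = cols.length := by
  induction ys generalizing s cols with
  | nil => simp [PySem.List.enumerate_nil]
  | cons y ys ih =>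
    rw [PySem.List.enumerate_cons]
    simp only [List.foldl_cons]
    have : ((s : Int) + 1) = ((s + 1 : Nat) : Int) := by push_cast; ring
    rw [this, ih]
    simp [PySem.List.pySetD_natCast]

theorem inner_get (ys : List Char) (s : Nat) (cols : List (PySem.Set Char)) (k : Nat)
    (hsl : s + ys.length <= cols.length) :
    ((PySem.List.enumerate ys (s : Int)).foldl
      (fun cols ic => PySem.List.pySetD cols ic.1 (PySem.Set.add (PySem.List.pyGetD cols ic.1 []) ic.2))
      cols).getD k [] =
    if s <= k ∧ k < s + ys.length then PySem.Set.add (cols.getD k []) (ys.getD (k - s) ' ')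
    else cols.getD k [] := by
  induction ys generalizing s cols with
  | nil => simp [PySem.List.enumerate_nil]
  | cons y ys ih =>
    rw [PySem.List.enumerate_cons]
    simp only [List.foldl_cons]
    have hc : ((s : Int) + 1) = ((s + 1 : Nat) : Int) := by push_cast; ring
    rw [hc, ih]
    · simp only [PySem.List.pySetD_natCast, PySem.List.pyGetD_natCast]
      have hs : s < cols.length := by simp at hsl; omega
      have hget : ∀ j : Nat, (cols.set s (PySem.Set.add (cols.getD s []) y)).getD j [] =
          if j = s then PySem.Set.add (cols.getD s []) y else cols.getD j [] := by
        intro j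
        simp only [List.getD, List.getElem?_set]
        split_ifs with h1 h2 h2
        · subst h1; simp [hs, List.getD]
        · omega
        · omega
        · rfl
      by_cases hk : k = s
      · subst hk
        rw [if_neg (by omega), hget, if_pos rfl,
           if_pos (by constructor <;> simp <;> omega)]
        simp
      · rw [hget, if_neg hk]
        by_cases h2 : s + 1 ≤ k ∧ k < s + 1 + ys.length
        · rw [if_pos h2, if_pos (by simp; omega)]
          have : k - s = (k - (s+1)) + 1 := by omega
          rw [this]
          simp [List.getD_cons_succ]
        · rw [if_neg h2, if_neg (by simp; omega)]
    · simp [PySem.List.pySetD_natCast] at hsl ⊢; omega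

def colN (phrases : List (List Char)) (k : Nat) : List Char :=
  (phrases.filter (fun p => decide ((k : Int) < (p.length : Int)))).map
    (fun p => PySem.List.pyGetD p (k : Int) ' ')

theorem outer_get (ps : List (List Char)) (n : Nat) (cols : List (PySem.Set Char)) (k : Nat)
    (hlen : cols.length = n) (hk : k < n) :
    (ps.foldl (fun cols p =>
      (PySem.List.enumerate (p.take n) 0).foldl
        (fun cols ic => PySem.List.pySetD cols ic.1 (PySem.Set.add (PySem.List.pyGetD cols ic.1 []) ic.2))
        cols) cols).getD k [] = PySem.Set.update (cols.getD k []) (colN ps k) := by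
  induction ps generalizing cols with
  | nil => simp [colN, PySem.Set.update]
  | cons p ps ih =>
    simp only [List.foldl_cons]
    have h0 : ((0:Int)) = ((0:Nat):Int) := rfl
    have hlen' : ((PySem.List.enumerate (p.take n) 0).foldl
        (fun cols ic => PySem.List.pySetD cols ic.1 (PySem.Set.add (PySem.List.pyGetD cols ic.1 []) ic.2))
        cols).length = n := by rw [h0, inner_len]; exact hlen
    rw [ih _ hlen']
    rw [h0, inner_get _ _ _ _ (by simp [hlen])]
    have hcol : colN (p :: ps) k =
        (if k < p.length then [PySem.List.pyGetD p (k:Int) ' '] else []) ++ colN ps k := by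
      by_cases h : k < p.length <;> simp [colN, List.filter_cons, h]
    rw [hcol]
    by_cases h : k < p.length
    · rw [if_pos (by simp; omega)]
      rw [if_pos h]
      have : (p.take n).getD (k - 0) ' ' = PySem.List.pyGetD p (k:Int) ' ' := by
        simp [List.getD, List.getElem?_take, hk]
      rw [this]
      simp [PySem.Set.update_cons]
    · rw [if_neg (by simp; omega), if_neg h]
      simp

theorem cols_get (phrases : List (List Char)) (n k : Nat) (hk : k < n) :
    (pvCols phrases n).getD k [] = PySem.Set.ofList (colN phrases k) := by
  unfold pvCols
  rw [outer_get _ _ _ _ (by simp) hk]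
  simp [List.getD, List.getElem?_replicate, hk, PySem.Set.update, PySem.Set.ofList_eq_foldl]

theorem min_eq_of (l : List Char) (m : Char) (hm : m ∈ l) (hmin : ∀ y ∈ l, m <= y) :
    PySem.List.min? l (fun x => x) = some m := by
  cases h : PySem.List.min? l (fun x => x) with
  | none => rw [PySem.List.min?_eq_none_iff] at h; subst h; simp at hm
  | some m' =>
    have h1 := PySem.List.min?_mem h
    have h2 := PySem.List.min?_isMin h m hm
    have h3 := hmin m' h1
    simp at h2
    exact congrArg some (le_antisymm h2 h3)

theorem min_congr (l l' : List Char) (h : ∀ x, x ∈ l ↔ x ∈ l') :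
    PySem.List.min? l (fun x => x) = PySem.List.min? l' (fun x => x) := by
  cases h1 : PySem.List.min? l (fun x => x) with
  | none =>
    rw [PySem.List.min?_eq_none_iff] at h1; subst h1
    cases h2 : PySem.List.min? l' (fun x => x) with
    | none => rfl
    | some m => have := PySem.List.min?_mem h2; rw [← h] at this; simp at this
  | some m =>
    have hm := PySem.List.min?_mem h1
    have hmin := PySem.List.min?_isMin h1
    rw [min_eq_of l' m ((h m).mp hm) (fun y hy => by simpa using hmin y ((h y).mpr hy))]

theorem succ_eq (l : List Char) (hs : l.Pairwise (· < ·)) (c : Char) (hc : c ∈ l) :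
    pvGetNextChar c l =
      (match PySem.List.min? (l.filter (fun x => decide (c < x))) (fun x => x) with
       | some m => m
       | none => (PySem.List.min? l (fun x => x)).getD c) := by
  unfold pvGetNextChar
  rw [if_pos hc]
  obtain ⟨k, hik⟩ := Option.isSome_iff_exists.mp ((PySem.List.index?_isSome_iff (xs := l) (v := c)).mpr hc)
  rw [hik]
  show PySem.List.pyGetD l (((k + 1) % l.length : Nat) : Int) c = _
  obtain ⟨hk, hlk, _⟩ := PySem.List.getElem_of_index?_eq_some hik
  have hmono : ∀ i j (hi : i < l.length) (hj : j < l.length), i < j → l[i] < l[j] :=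
    fun i j hi hj hij => List.pairwise_iff_getElem.mp hs i j hi hj hij
  by_cases hlast : k + 1 < l.length
  · rw [Nat.mod_eq_of_lt hlast]
    rw [PySem.List.pyGetD_natCast]
    have hmem : l[k+1] ∈ l.filter (fun x => decide (c < x)) := by
      rw [List.mem_filter]
      refine ⟨List.getElem_mem _, ?_⟩
      simp [← hlk]
      exact hmono k (k+1) hk hlast (by omega)
    have hminv : ∀ y ∈ l.filter (fun x => decide (c < x)), l[k+1] ≤ y := by
      intro y hy
      rw [List.mem_filter] at hy
      obtain ⟨hyl, hcy⟩ := hy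
      simp at hcy
      obtain ⟨j, hj, hjy⟩ := List.mem_iff_getElem.mp hyl
      subst hjy
      rcases Nat.lt_or_ge j (k+1) with hjk | hjk
      · exfalso
        rcases Nat.lt_or_ge j k with hjk' | hjk'
        · exact absurd (hmono j k hj hk hjk') (by rw [hlk]; exact not_lt.mpr (le_of_lt hcy))
        · have : j = k := by omega
          subst this
          rw [hlk] at hcy
          exact lt_irrefl _ hcy
      · rcases Nat.eq_or_lt_of_le hjk with h | h
        · simp [h]
        · exact le_of_lt (hmono (k+1) j hlast hj h)
    rw [min_eq_of _ _ hmem hminv]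
    simp [List.getD, List.getElem?_eq_getElem hlast]
  · have hkl : k + 1 = l.length := by omega
    rw [hkl, Nat.mod_self]
    have hnil : l.filter (fun x => decide (c < x)) = [] := by
      rw [List.filter_eq_nil_iff]
      intro y hy
      obtain ⟨j, hj, hjy⟩ := List.mem_iff_getElem.mp hy
      subst hjy
      simp
      rcases Nat.lt_or_ge j k with hjk | hjk
      · exact le_of_lt (by rw [← hlk]; exact hmono j k hj hk hjk)
      · have : j = k := by omega
        subst this; rw [hlk]
    rw [hnil]
    have h0 : 0 < l.length := by omega
    have hmin : PySem.List.min? l (fun x => x) = some (l[0]) := by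
      apply min_eq_of
      · exact List.getElem_mem _
      · intro y hy
        obtain ⟨j, hj, hjy⟩ := List.mem_iff_getElem.mp hy
        subst hjy
        rcases Nat.eq_or_lt_of_le (Nat.zero_le j) with h | h
        · simp [← h]
        · exact le_of_lt (hmono 0 j h0 hj h)
    have hne : PySem.List.min? ([] : List Char) (fun x => x) = none := by
      rw [PySem.List.min?_eq_none_iff]
    rw [hne]
    show PySem.List.pyGetD l ((0:Nat):Int) c = (PySem.List.min? l (fun x => x)).getD c
    rw [hmin, PySem.List.pyGetD_natCast]
    simp [List.getD, List.getElem?_eq_getElem h0]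

theorem nextDigit_eq_nextChar (c : Char) (l : List Char) : pvGetNextDigit c l = pvGetNextChar c l := rfl

-- one position: A's sorted-set cyclic advance equals B's min-based successor from the set
theorem branch_eq (colL : List Char) (P : Char → Bool) (c : Char) (hc : c ∈ colL) (hP : P c = true) :
    pvGetNextChar c (PySem.List.sorted (PySem.Set.ofList (colL.filter (fun ch => P ch))) (fun x => x) false) =
      (match PySem.List.min? (((PySem.Set.ofList colL).filter (fun x => P x)).filter
               (fun x => decide (c < x))) (fun x => x) with
       | some m => m
       | none => (PySem.List.min? ((PySem.Set.ofList colL).filter (fun x => P x)) (fun x => x)).getD c) := by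
  set uc := PySem.List.sorted (PySem.Set.ofList (colL.filter (fun ch => P ch))) (fun x => x) false with huc
  have hpair : uc.Pairwise (· < ·) := by
    simpa [huc] using PySem.List.sorted_ofList_pairwise_lt (colL.filter (fun ch => P ch))
  have hmemuc : ∀ x, x ∈ uc ↔ x ∈ colL ∧ P x = true := by
    intro x
    rw [huc, PySem.List.mem_sorted, PySem.Set.mem_ofList, List.mem_filter]
  have hmempool : ∀ x, x ∈ (PySem.Set.ofList colL).filter (fun x => P x) ↔ x ∈ colL ∧ P x = true := by
    intro x
    rw [List.mem_filter, PySem.Set.mem_ofList]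
  rw [succ_eq uc hpair c ((hmemuc c).mpr ⟨hc, hP⟩)]
  have e1 : PySem.List.min? (uc.filter (fun x => decide (c < x))) (fun x => x) =
      PySem.List.min? (((PySem.Set.ofList colL).filter (fun x => P x)).filter
        (fun x => decide (c < x))) (fun x => x) := by
    apply min_congr
    intro x
    simp only [List.mem_filter, hmemuc, hmempool]
  have e2 : PySem.List.min? uc (fun x => x) =
      PySem.List.min? ((PySem.Set.ofList colL).filter (fun x => P x)) (fun x => x) := by
    apply min_congr
    intro x
    rw [hmemuc, hmempool]
  rw [e1, e2]

theorem main_lemma (phrases : List (List Char)) (base : List Char)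
    (hb : base ∈ phrases) :
    pvGenA phrases base = pvGenB phrases base := by
  unfold pvGenA pvGenB
  rw [PySem.List.enumerate_eq_map_pyRange base ' ', List.foldl_map]
  have hl : PySem.List.len base = (base.length : Int) := by simp [PySem.List.len]
  rw [hl]
  apply PySem.List.foldl_congr_mem
  intro acc i hi
  rw [PySem.List.mem_pyRange_one] at hi
  obtain ⟨k, rfl⟩ := Int.eq_ofNat_of_zero_le hi.1
  have hk : k < base.length := by exact_mod_cast hi.2
  simp only []
  have hcols : PySem.List.pyGetD (pvCols phrases base.length) ((k : Int)) [] =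
      PySem.Set.ofList (colN phrases k) := by
    rw [PySem.List.pyGetD_natCast, cols_get phrases base.length k hk]
  have hcmem : PySem.List.pyGetD base ((k : Int)) ' ' ∈ colN phrases k := by
    rw [colN]
    apply List.mem_map.mpr
    refine ⟨base, List.mem_filter.mpr ⟨hb, by simp [hk]⟩, rfl⟩
  rw [hcols]
  have hfold : (List.filter (fun p => decide ((k:Int) < (p.length:Int))) phrases).map
      (fun p => PySem.List.pyGetD p (k:Int) ' ') = colN phrases k := rfl
  rw [hfold]
  set c := PySem.List.pyGetD base ((k : Int)) ' ' with hcdef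
  by_cases ha : PySem.Chars.isalpha c
  · rw [if_pos ha, if_pos ha, branch_eq (colN phrases k) PySem.Chars.isalpha c hcmem ha]
  · rw [if_neg ha, if_neg ha]
    by_cases hd : PySem.Chars.isdigit c
    · rw [if_pos hd, if_pos hd, nextDigit_eq_nextChar,
         branch_eq (colN phrases k) PySem.Chars.isdigit c hcmem hd]
    · rw [if_neg hd, if_neg hd]

-- ===== VERDICT (by name: the statement is the Claim_ definition above) =====
theorem generate_next_phrase_spec : Claim_equal_generate_next_phrase := by
  intro phrases _ hpre
  unfold Spec_generate_next_phrase generate_next_phrase generate_next_phrase_alt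
  obtain ⟨q, t, rfl⟩ := List.exists_cons_of_ne_nil hpre
  rw [PySem.List.pyGetD_zero_cons]
  rw [main_lemma (phrases := (q :: t).map String.toList) (base := q.toList)
      (by simp)]
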